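-- pv_equiv track=rewrite | github.com/Monotoba/Aster-Lang | src/aster_lang/doc_gen.py | _extract_doc
-- ===== SOURCE A (Python) =====
-- def _extract_doc(leading_comments: list[str]) -> str:
--     """Convert a list of leading comment strings into doc text.
--
--     Only ``##``-prefixed comments are treated as doc comments; regular
--     ``#`` comments are ignored.  Consecutive ``##`` lines are joined;
--     a bare ``##`` (no text after the prefix) becomes a paragraph break.
--     """
--     doc_lines: list[str] = []
--     for raw in leading_comments:
--         stripped = raw.strip()
--         if stripped.startswith("##"):
--             content = stripped[2:].strip()
--             doc_lines.append(content)
--         # Regular # comments are skipped silently.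
--     if not doc_lines:
--         return ""
--     # Join runs, turning bare lines into paragraph breaks.
--     paragraphs: list[list[str]] = [[]]
--     for line in doc_lines:
--         if line == "":
--             if paragraphs[-1]:
--                 paragraphs.append([])
--         else:
--             paragraphs[-1].append(line)
--     return "\n\n".join(" ".join(p) for p in paragraphs if p)
-- ===== SOURCE B (Python) =====
-- def _extract_doc(leading_comments: list[str]) -> str:
--     """Cursor-driven two-mode scan over the raw comments: no intermediate
--     doc_lines list and no list-of-lists accumulator.  The cursor alternates
--     between a skip mode (past non-doc comments and blank doc lines) and a
--     collect mode (gathering one paragraph's words until a blank doc line)."""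
--     def content(raw):
--         s = raw.strip()
--         return s[2:].strip() if s.startswith("##") else None
--
--     n = len(leading_comments)
--     paras = []
--     i = 0
--     while True:
--         # skip mode: advance past ignored comments and blank doc lines
--         while i < n and not content(leading_comments[i]):
--             i += 1
--         if i == n:
--             break
--         # collect mode: gather one paragraph, stop after a blank doc line
--         words = []
--         while i < n:
--             c = content(leading_comments[i])
--             i += 1
--             if c is None:
--                 continue
--             if c == "":
--                 break
--             words.append(c)
--         paras.append(" ".join(words))
--     return "\n\n".join(paras)
-- ===== Notes on version B (the rewrite author's own statement) =====
-- stated objective: alternative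
-- what changed: A's two staged passes (build a doc_lines list, then fold it through a list-of-lists paragraph accumulator) are replaced by a single cursor-driven scan over the raw comments that alternates between a skip mode and a collect mode, building each paragraph's word string directly with no intermediate doc_lines list and no list-of-lists state.
import Mathlib
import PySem

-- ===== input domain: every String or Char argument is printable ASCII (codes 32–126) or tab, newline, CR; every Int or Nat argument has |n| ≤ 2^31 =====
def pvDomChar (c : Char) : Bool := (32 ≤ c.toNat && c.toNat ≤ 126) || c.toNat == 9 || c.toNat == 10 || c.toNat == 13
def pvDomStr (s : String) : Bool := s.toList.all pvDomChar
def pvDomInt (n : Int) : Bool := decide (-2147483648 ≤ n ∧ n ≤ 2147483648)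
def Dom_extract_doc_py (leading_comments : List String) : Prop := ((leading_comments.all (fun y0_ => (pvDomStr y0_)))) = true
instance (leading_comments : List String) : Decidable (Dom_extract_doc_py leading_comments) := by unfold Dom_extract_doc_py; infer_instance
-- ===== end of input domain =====

-- B replaces A's two staged passes (doc_lines list, then a list-of-lists paragraph
-- accumulator) by one cursor scan over the raw comments alternating between a skip
-- mode and a collect mode (objective: alternative, same cost).

-- ===== PORT A =====
-- one step of A's paragraph loop (paragraphs[-1] access / in-place append, transcribed on immutable lists)
def pvStepA (ps : List (List String)) (line : String) : List (List String) :=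
  if line = "" then
    if ps.getLast! ≠ [] then ps ++ [[]] else ps
  else
    ps.dropLast ++ [ps.getLast! ++ [line]]

def extract_doc_py (leading_comments : List String) : String :=
  let doc_lines : List String := leading_comments.foldl (fun acc raw =>
    let stripped := PySem.Str.strip raw
    if PySem.Str.startswith stripped "##" then
      acc ++ [PySem.Str.strip (PySem.Str.slice stripped (some 2) none)]
    else acc) []
  if doc_lines = [] then ""
  else
    let paragraphs := doc_lines.foldl pvStepA [[]]
    PySem.Str.join "\n\n" ((paragraphs.filter (fun p => p ≠ [])).map (fun p => PySem.Str.join " " p))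

-- ===== PORT B =====
-- B's `content` helper: doc-comment content, or none for a regular comment
def pvContent (raw : String) : Option String :=
  let s := PySem.Str.strip raw
  if PySem.Str.startswith s "##" then
    some (PySem.Str.strip (PySem.Str.slice s (some 2) none))
  else none

-- B's collect-mode while loop: gather one paragraph's words, return them with the
-- unconsumed rest of the comment list (the cursor i becomes the list tail)
def pvCollect : List String → List String → (List String × List String)
  | [], ws => (ws, [])
  | r :: t, ws =>
    match pvContent r with
    | none => pvCollect t ws
    | some c => if c = "" then (ws, t) else pvCollect t (ws ++ [c])

theorem pvCollect_len (t : List String) (ws : List String) :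
    (pvCollect t ws).2.length ≤ t.length := by
  induction t generalizing ws with
  | nil => simp [pvCollect]
  | cons r t ih =>
    simp only [pvCollect]
    cases pvContent r with
    | none => exact le_trans (ih ws) (by simp)
    | some c =>
      by_cases hc : c = ""
      · simp [hc]
      · simpa [hc] using le_trans (ih (ws ++ [c])) (by simp)

-- B's outer loop: skip mode then one collect-mode paragraph, repeated
def pvParas : List String → List String
  | [] => []
  | r :: t =>
    match pvContent r with
    | none => pvParas t
    | some c =>
      if c = "" then pvParas t
      else PySem.Str.join " " (pvCollect t [c]).1 :: pvParas (pvCollect t [c]).2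
termination_by ls => ls.length
decreasing_by
  all_goals simp
  all_goals exact pvCollect_len t [c]

def extract_doc_py_alt (leading_comments : List String) : String :=
  PySem.Str.join "\n\n" (pvParas leading_comments)

-- ===== PRECONDITION & SPEC =====
def Spec_extract_doc_py (leading_comments : List String) (out : String) : Prop := out = extract_doc_py_alt leading_comments
instance (leading_comments : List String) (out : String) : Decidable (Spec_extract_doc_py leading_comments out) := by unfold Spec_extract_doc_py; infer_instance

-- ===== CLAIM (what is proved, stated in full; the proofs are below) =====
def Claim_equal_extract_doc_py : Prop := ∀ (leading_comments : List String), Dom_extract_doc_py leading_comments → Spec_extract_doc_py leading_comments (extract_doc_py leading_comments)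

-- ===== LEMMAS AND PROOFS =====

-- reference grouping: pvGlue cur ls = the non-empty paragraphs produced from ls with open paragraph cur
def pvGlue (cur : List String) : List String → List (List String)
  | [] => if cur = [] then [] else [cur]
  | l :: t => if l = "" then (if cur = [] then pvGlue [] t else cur :: pvGlue [] t)
              else pvGlue (cur ++ [l]) t

-- A's paragraph state machine, filtered to non-empty paragraphs, computes pvGlue
theorem pvFoldA_glue (ls : List String) (ps : List (List String)) (cur : List String)
    (hps : ∀ p ∈ ps, p ≠ []) :
    (ls.foldl pvStepA (ps ++ [cur])).filter (fun p => p ≠ []) = ps ++ pvGlue cur ls := by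
  induction ls generalizing ps cur with
  | nil =>
    simp [pvGlue, List.filter_append]
    rw [List.filter_eq_self.mpr (by simpa using hps)]
    by_cases h : cur = [] <;> simp [h]
  | cons l t ih =>
    by_cases hl : l = ""
    · subst hl
      by_cases hc : cur = []
      · subst hc
        have : pvStepA (ps ++ [[]]) "" = ps ++ [[]] := by
          simp [pvStepA]
        simp only [List.foldl_cons, this, pvGlue]
        simpa using ih ps [] hps
      · have hstep : pvStepA (ps ++ [cur]) "" = (ps ++ [cur]) ++ [[]] := by
          simp [pvStepA, hc]
        have hps' : ∀ p ∈ ps ++ [cur], p ≠ [] := by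
          intro p hp
          rcases List.mem_append.mp hp with h|h
          · exact hps p h
          · simp at h; subst h; exact hc
        rw [List.foldl_cons, hstep, ih (ps ++ [cur]) [] hps']
        simp [pvGlue, hc]
    · have hlast : (ps ++ [cur]).getLast! = cur := by simp
      have hdrop : (ps ++ [cur]).dropLast = ps := by simp
      have : pvStepA (ps ++ [cur]) l = ps ++ [cur ++ [l]] := by
        simp [pvStepA, hl, hdrop]
      simp only [List.foldl_cons, this, pvGlue, hl]
      exact ih ps (cur ++ [l]) hps

theorem pvGlue_ne (t : List String) (cur : List String) (h : cur ≠ []) :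
    pvGlue cur t = (cur ++ t.takeWhile (· ≠ "")) :: pvGlue [] (t.dropWhile (· ≠ "")) := by
  induction t generalizing cur with
  | nil => simp [pvGlue, h]
  | cons l t ih =>
    by_cases hl : l = ""
    · subst hl; simp [pvGlue, h, List.takeWhile, List.dropWhile]
    · simp only [pvGlue, if_neg hl]
      rw [ih (cur ++ [l]) (by simp)]
      simp [hl]

-- A's append loop over leading_comments computes a filterMap by pvContent
theorem pvDocLines_eq (lc : List String) :
    lc.foldl (fun acc raw =>
      let stripped := PySem.Str.strip raw
      if PySem.Str.startswith stripped "##" then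
        acc ++ [PySem.Str.strip (PySem.Str.slice stripped (some 2) none)]
      else acc) [] = lc.filterMap pvContent := by
  induction lc using List.reverseRecOn with
  | nil => rfl
  | append_singleton t a ih =>
    rw [List.foldl_append, List.filterMap_append, ih]
    simp only [List.foldl_cons, List.foldl_nil, List.filterMap_cons, List.filterMap_nil, pvContent]
    by_cases h : PySem.Str.startswith (PySem.Str.strip a) "##"
    · simp only [h, if_true]
    · simp only [Bool.not_eq_true] at h
      simp only [h, Bool.false_eq_true, if_false, List.append_nil]

theorem pvDropWhile_head (p : String → Bool) (l : List String) (x : String)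
    (xs : List String) (h : l.dropWhile p = x :: xs) : p x = false := by
  induction l with
  | nil => simp at h
  | cons a t ih =>
    by_cases hp : p a
    · rw [List.dropWhile_cons_of_pos hp] at h; exact ih h
    · rw [List.dropWhile_cons_of_neg hp] at h; cases h; simpa using hp

-- B's collect loop: words collected = ws ++ the blank-delimited run of doc contents,
-- and the unread rest's doc contents = what follows the delimiting blank
theorem pvCollect_spec (t : List String) (ws : List String) :
    (pvCollect t ws).1 = ws ++ (t.filterMap pvContent).takeWhile (· ≠ "") ∧
    (pvCollect t ws).2.filterMap pvContent = ((t.filterMap pvContent).dropWhile (· ≠ "")).tail := by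
  induction t generalizing ws with
  | nil => simp [pvCollect]
  | cons r t ih =>
    simp only [pvCollect, List.filterMap_cons]
    cases h : pvContent r with
    | none => simpa using ih ws
    | some c =>
      by_cases hc : c = ""
      · simp [hc, List.takeWhile, List.dropWhile]
      · dsimp only
        rw [if_neg hc]
        constructor
        · rw [(ih (ws ++ [c])).1, List.takeWhile_cons_of_pos (by simp [hc])]
          simp
        · rw [(ih (ws ++ [c])).2, List.dropWhile_cons_of_pos (by simp [hc])]

-- B's outer scan computes the joined paragraphs of pvGlue over the doc contents
theorem pvParas_glue (lc : List String) :
    pvParas lc = (pvGlue [] (lc.filterMap pvContent)).map (PySem.Str.join " ") := by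
  induction lc using pvParas.induct with
  | case1 => simp [pvParas, pvGlue]
  | case2 r t h ih => simp [pvParas, h, ih]
  | case3 r t h ih =>
    simp only [pvParas, h, List.filterMap_cons, ih]
    simp [pvGlue]
  | case4 r t c h hc ih =>
    simp only [pvParas, h, List.filterMap_cons]
    rw [if_neg hc]
    have hspec := pvCollect_spec t [c]
    rw [pvGlue, if_neg hc,
        show ([] : List String) ++ [c] = [c] from rfl,
        pvGlue_ne (t.filterMap pvContent) [c] (by simp)]
    rw [ih, hspec.2]
    have hdw : pvGlue [] ((t.filterMap pvContent).dropWhile (· ≠ "")) =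
        pvGlue [] (((t.filterMap pvContent).dropWhile (· ≠ "")).tail) := by
      cases hdd : (t.filterMap pvContent).dropWhile (· ≠ "") with
      | nil => simp
      | cons x xs =>
        have hx : x = "" := by
          have := pvDropWhile_head _ _ _ _ hdd
          simpa using this
        simp [pvGlue, hx]
    rw [← hdw, List.map, hspec.1]

-- ===== VERDICT (by name: the statement is the Claim_ definition above) =====
theorem extract_doc_py_spec : Claim_equal_extract_doc_py := by
  intro lc _
  unfold Spec_extract_doc_py extract_doc_py extract_doc_py_alt
  simp only []
  rw [pvDocLines_eq lc]
  set dl := lc.filterMap pvContent with hdl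
  by_cases h : dl = []
  · rw [if_pos h]
    rw [pvParas_glue, ← hdl, h]
    simp [pvGlue, PySem.Str.join, PySem.Chars.join, List.intercalate]
  · rw [if_neg h]
    have := pvFoldA_glue dl [] [] (by intro p hp; simp at hp)
    simp only [List.nil_append] at this
    rw [this, pvParas_glue, ← hdl]
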